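-- pv_equiv track=rewrite | github.com/hanling114/essayscore | Backend/app.py | classify_left_baselines_by_index
-- ===== SOURCE A (Python) =====
-- def classify_left_baselines_by_index(left_coords, tolerance):
--     """
--     尝试从 left 坐标中找出两个主要的基线 (标准左边缘和缩进左边缘)。
--
--     Args:
--         left_coords: 所有识别块的 left 坐标列表。
--         tolerance: 允许坐标值接近的像素容忍度。
--
--     Returns:
--         Tuple[List[int], List[int]]: (standard_indices, indent_indices) -
--                                      分别包含属于第一类和第二类的行索引列表。
--     """
--     if not left_coords:
--         return [], []
--     clusters = [[0], []]
--     current_cluster = 0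
--     min_lefts  = [left_coords[0],9999999999]
--     #根据这行与上一行之间的left距离来分类，left距离接近，则这行与上一行为同一类,反之为另一类
--     for i in range(1, len(left_coords)):
--         current_coord = left_coords[i]
--         baseline_coord = left_coords[i-1]
--         if abs(current_coord - baseline_coord) <= tolerance:#判断这行与上行的left距离是否接近
--             clusters[current_cluster].append(i)
--             min_lefts [current_cluster] = min(min_lefts[current_cluster],left_coords[i])
--         else:
--             current_cluster = 1 - current_cluster  # 在 0 和 1 之间切换
--             clusters[current_cluster].append(i)
--             min_lefts[current_cluster] = min(min_lefts[current_cluster],left_coords[i])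
--     if min_lefts[0] > min_lefts[1]:
--         return clusters[0]
--     else: return clusters[1]
-- ===== SOURCE B (Python) =====
-- def classify_left_baselines_by_index(left_coords, tolerance):
--     if not left_coords:
--         return [], []
--     # pass 1: parity of "breaks" seen so far assigns each index a cluster
--     parity = [0]
--     p = 0
--     for prev, cur in zip(left_coords, left_coords[1:]):
--         if abs(cur - prev) > tolerance:
--             p = 1 - p
--         parity.append(p)
--     # pass 2: partition indices by parity
--     c0 = [i for i, q in enumerate(parity) if q == 0]
--     c1 = [i for i, q in enumerate(parity) if q == 1]
--     # pass 3: per-cluster minimum left coordinate (empty cluster -> sentinel)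
--     m0 = min((v for v, q in zip(left_coords, parity) if q == 0), default=9999999999)
--     m1 = min((v for v, q in zip(left_coords, parity) if q == 1), default=9999999999)
--     return c0 if m0 > m1 else c1
-- ===== Notes on version B (the rewrite author's own statement) =====
-- stated objective: alternative
-- what changed: A's single stateful loop (two growing clusters, a toggling cluster cursor and two running minima updated in place) is replaced by separate passes: a parity-of-breaks list over adjacent pairs, two enumerate-filter partitions of the indices, and two per-cluster minima computed afterwards.
-- outside the precondition, e.g. on classify_left_baselines_by_index([], 0): A returns [[], []], B returns [[], []]
import Mathlib
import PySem

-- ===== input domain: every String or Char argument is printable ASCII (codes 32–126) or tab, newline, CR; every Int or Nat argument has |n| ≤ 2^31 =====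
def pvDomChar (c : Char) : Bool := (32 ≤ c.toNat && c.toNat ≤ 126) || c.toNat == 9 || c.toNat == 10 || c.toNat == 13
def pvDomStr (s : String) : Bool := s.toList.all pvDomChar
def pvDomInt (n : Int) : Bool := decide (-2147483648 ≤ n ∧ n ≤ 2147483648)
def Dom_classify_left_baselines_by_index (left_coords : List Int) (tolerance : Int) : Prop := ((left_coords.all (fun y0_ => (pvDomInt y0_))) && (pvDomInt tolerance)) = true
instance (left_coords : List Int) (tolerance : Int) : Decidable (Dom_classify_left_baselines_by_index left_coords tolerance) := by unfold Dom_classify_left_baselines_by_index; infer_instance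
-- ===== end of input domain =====

-- B replaces A's single stateful loop (two clusters + two running minima + a toggling
-- cluster cursor) by separate passes: a parity-of-breaks list, two index partitions and
-- two per-cluster minima; objective: alternative decomposition (same cost).

-- ===== PORT A =====
-- the body of A's for-loop (clusters[cur].append / min_lefts[cur] update, written per cluster)
def pvStepA (left_coords : List Int) (tolerance : Int)
    (st : List Int × List Int × Int × Int × Int) (i : Int) :
    List Int × List Int × Int × Int × Int :=
  match st with
  | (c0, c1, cur, m0, m1) =>
    let current := PySem.List.pyGetD left_coords i 0
    let baseline := PySem.List.pyGetD left_coords (i - 1) 0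
    if |current - baseline| ≤ tolerance then
      if cur = 0 then (c0 ++ [i], c1, cur, min m0 current, m1)
      else (c0, c1 ++ [i], cur, m0, min m1 current)
    else
      if 1 - cur = 0 then (c0 ++ [i], c1, 1 - cur, min m0 current, m1)
      else (c0, c1 ++ [i], 1 - cur, m0, min m1 current)

def classify_left_baselines_by_index (left_coords : List Int) (tolerance : Int) : List Int :=
  match left_coords with
  | [] => []  -- Python returns the PAIR ([], []) here, not a list of ints; excluded by Pre_
  | _ :: _ =>
    let fin := (PySem.List.pyRange 1 (left_coords.length : Int) 1).foldl
        (pvStepA left_coords tolerance)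
        ([0], [], 0, PySem.List.pyGetD left_coords 0 0, 9999999999)
    if fin.2.2.2.1 > fin.2.2.2.2 then fin.1 else fin.2.1

-- ===== PORT B =====
-- the body of B's parity loop
def pvStepB (tolerance : Int) (st : List Int × Int) (pc : Int × Int) : List Int × Int :=
  let p := if |pc.2 - pc.1| > tolerance then 1 - st.2 else st.2
  (st.1 ++ [p], p)

-- B's comprehensions, named
def pvC0 (par : List Int) : List Int :=
  ((PySem.List.enumerate par 0).filter (fun iq => iq.2 == 0)).map (fun iq => iq.1)
def pvC1 (par : List Int) : List Int :=
  ((PySem.List.enumerate par 0).filter (fun iq => iq.2 == 1)).map (fun iq => iq.1)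
def pvM0 (vals par : List Int) : Int :=
  PySem.List.minD (((vals.zip par).filter (fun vq => vq.2 == 0)).map (fun vq => vq.1)) (fun y => y) 9999999999
def pvM1 (vals par : List Int) : Int :=
  PySem.List.minD (((vals.zip par).filter (fun vq => vq.2 == 1)).map (fun vq => vq.1)) (fun y => y) 9999999999

def classify_left_baselines_by_index_alt (left_coords : List Int) (tolerance : Int) : List Int :=
  match left_coords with
  | [] => []  -- Python B returns the pair ([], []) here as A does; excluded by Pre_
  | _ :: _ =>
    let par := ((left_coords.zip left_coords.tail).foldl (pvStepB tolerance) ([0], 0)).1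
    if pvM0 left_coords par > pvM1 left_coords par then pvC0 par else pvC1 par

-- ===== PRECONDITION & SPEC =====
-- Pre_ excludes only the empty list, where A (and B) return the tuple ([], []),
-- which is not a value of the declared return type List Int.
def Pre_classify_left_baselines_by_index (left_coords : List Int) (tolerance : Int) : Prop :=
  left_coords ≠ []
instance (left_coords : List Int) (tolerance : Int) : Decidable (Pre_classify_left_baselines_by_index left_coords tolerance) := by unfold Pre_classify_left_baselines_by_index; infer_instance

def pvWitness_classify_left_baselines_by_index : List Int × Int := ([10, 12, 40, 41], 5)

def Spec_classify_left_baselines_by_index (left_coords : List Int) (tolerance : Int) (out : List Int) : Prop := out = classify_left_baselines_by_index_alt left_coords tolerance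
instance (left_coords : List Int) (tolerance : Int) (out : List Int) : Decidable (Spec_classify_left_baselines_by_index left_coords tolerance out) := by unfold Spec_classify_left_baselines_by_index; infer_instance

-- ===== CLAIM (what is proved, stated in full; the proofs are below) =====
def Claim_equal_classify_left_baselines_by_index : Prop := ∀ (left_coords : List Int) (tolerance : Int), Dom_classify_left_baselines_by_index left_coords tolerance → Pre_classify_left_baselines_by_index left_coords tolerance → Spec_classify_left_baselines_by_index left_coords tolerance (classify_left_baselines_by_index left_coords tolerance)

-- ===== LEMMAS AND PROOFS =====

-- A-loop state synthesised from the coords consumed so far and their parity list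
def pvSt (vals par : List Int) : List Int × List Int × Int × Int × Int :=
  (pvC0 par, pvC1 par, par.getLastD 0, pvM0 vals par, pvM1 vals par)

-- B's parity loop as structural recursion over the remaining coords
def pvCont (tol : Int) : List Int → Int → List Int → List Int
  | [], _, par => par
  | c :: cs, prev, par =>
      pvCont tol cs c (par ++ [if |c - prev| > tol then 1 - par.getLastD 0 else par.getLastD 0])

lemma pvEnumAppend (l : List Int) (q : Int) (s : Int) :
    PySem.List.enumerate (l ++ [q]) s = PySem.List.enumerate l s ++ [((s + l.length : Int), q)] := by
  induction l generalizing s with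
  | nil => simp [PySem.List.enumerate_nil, PySem.List.enumerate_cons]
  | cons a t ih =>
      simp [PySem.List.enumerate_cons, ih (s + 1)]
      ring_nf

lemma pvC0_append (par : List Int) (q : Int) :
    pvC0 (par ++ [q]) = if q = 0 then pvC0 par ++ [(par.length : Int)] else pvC0 par := by
  unfold pvC0
  rw [pvEnumAppend]
  by_cases h : q = 0 <;> simp [h]

lemma pvC1_append (par : List Int) (q : Int) :
    pvC1 (par ++ [q]) = if q = 1 then pvC1 par ++ [(par.length : Int)] else pvC1 par := by
  unfold pvC1
  rw [pvEnumAppend]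
  by_cases h : q = 1 <;> simp [h]

lemma pvMinD_append (l : List Int) (v d : Int) (h : v ≤ d) :
    PySem.List.minD (l ++ [v]) (fun y => y) d
      = min (PySem.List.minD l (fun y => y) d) v := by
  cases l with
  | nil =>
      rw [List.nil_append, PySem.List.minD_id_cons, PySem.List.minD_nil]
      simp
      omega
  | cons a t =>
      rw [List.cons_append, PySem.List.minD_id_cons, PySem.List.minD_id_cons,
        List.foldl_append]
      simp

lemma pvM0_append (vals par : List Int) (c q : Int) (hlen : vals.length = par.length)
    (hc : c ≤ 9999999999) :
    pvM0 (vals ++ [c]) (par ++ [q])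
      = if q = 0 then min (pvM0 vals par) c else pvM0 vals par := by
  unfold pvM0
  rw [List.zip_append (by omega), List.filter_append]
  by_cases h : q = 0
  · simp [h, pvMinD_append _ _ _ hc]
  · simp [h]

lemma pvM1_append (vals par : List Int) (c q : Int) (hlen : vals.length = par.length)
    (hc : c ≤ 9999999999) :
    pvM1 (vals ++ [c]) (par ++ [q])
      = if q = 1 then min (pvM1 vals par) c else pvM1 vals par := by
  unfold pvM1
  rw [List.zip_append (by omega), List.filter_append]
  by_cases h : q = 1
  · simp [h, pvMinD_append _ _ _ hc]
  · simp [h]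

lemma pvGetD_append_len (u : List Int) (c : Int) (cs : List Int) :
    (u ++ c :: cs).getD u.length 0 = c := by
  induction u with
  | nil => simp
  | cons a t ih => simpa using ih

lemma pvGetD_append_pred (u : List Int) (h : u ≠ []) (ys : List Int) :
    (u ++ ys).getD (u.length - 1) 0 = u.getLastD 0 := by
  induction u with
  | nil => exact absurd rfl h
  | cons a t ih =>
      cases t with
      | nil => simp
      | cons b t' =>
          have := ih (by simp)
          simp only [List.length_cons, Nat.add_sub_cancel] at this ⊢
          simpa [List.getLastD_cons] using this

-- one A-step from a synthesised state is the synthesised state one element further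
lemma pvStepA_synth (tol : Int) (u par : List Int) (c : Int) (cs : List Int)
    (hu : u ≠ []) (hlen : par.length = u.length)
    (hp : par.getLastD 0 = 0 ∨ par.getLastD 0 = 1) (hc : c ≤ 9999999999) :
    pvStepA (u ++ c :: cs) tol (pvSt u par) (u.length : Int)
      = pvSt (u ++ [c])
          (par ++ [if |c - u.getLastD 0| > tol then 1 - par.getLastD 0 else par.getLastD 0]) := by
  obtain ⟨k, hk⟩ : ∃ k, u.length = k + 1 := by
    cases u with
    | nil => exact absurd rfl hu
    | cons a t => exact ⟨t.length, rfl⟩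
  have hcur : PySem.List.pyGetD (u ++ c :: cs) (u.length : Int) 0 = c := by
    rw [PySem.List.pyGetD_natCast, pvGetD_append_len]
  have hbase : PySem.List.pyGetD (u ++ c :: cs) ((u.length : Int) - 1) 0 = u.getLastD 0 := by
    have h1 : ((u.length : Int) - 1) = ((u.length - 1 : Nat) : Int) := by omega
    rw [h1, PySem.List.pyGetD_natCast, pvGetD_append_pred u hu]
  unfold pvStepA pvSt
  dsimp only
  simp only [hcur, hbase]
  have hgl : (par ++ [if |c - u.getLastD 0| > tol then 1 - par.getLastD 0
      else par.getLastD 0]).getLastD 0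
      = if |c - u.getLastD 0| > tol then 1 - par.getLastD 0 else par.getLastD 0 := by
    simp
  rw [pvC0_append, pvC1_append, pvM0_append u par c _ (by omega) hc,
    pvM1_append u par c _ (by omega) hc, hgl, hlen]
  by_cases hcond : |c - u.getLastD 0| ≤ tol
  · simp only [if_pos hcond, if_neg (not_lt.mpr hcond)]
    rcases hp with hp' | hp' <;> rw [hp'] <;> norm_num
  · simp only [if_neg hcond, if_pos (not_le.mp hcond)]
    rcases hp with hp' | hp' <;> rw [hp'] <;> norm_num

lemma pvMain (tol : Int) : ∀ (rest u par : List Int),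
    u ≠ [] → par.length = u.length →
    (par.getLastD 0 = 0 ∨ par.getLastD 0 = 1) →
    (∀ v ∈ rest, v ≤ 9999999999) →
    (PySem.List.pyRange (u.length : Int) (((u ++ rest).length : Nat) : Int) 1).foldl
        (pvStepA (u ++ rest) tol) (pvSt u par)
      = pvSt (u ++ rest) (pvCont tol rest (u.getLastD 0) par) := by
  intro rest
  induction rest with
  | nil =>
      intro u par hu hlen hp hv
      rw [PySem.List.pyRange_one_eq_nil (by simp)]
      simp [pvCont]
  | cons c cs ih =>
      intro u par hu hlen hp hv
      have hlt : (u.length : Int) < (((u ++ c :: cs).length : Nat) : Int) := by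
        simp only [List.length_append, List.length_cons]
        omega
      rw [PySem.List.pyRange_one_cons hlt, List.foldl_cons]
      rw [pvStepA_synth tol u par c cs hu hlen hp (hv c (by simp))]
      set q : Int := if |c - u.getLastD 0| > tol then 1 - par.getLastD 0 else par.getLastD 0 with hq
      have hassoc : u ++ c :: cs = (u ++ [c]) ++ cs := by simp
      have hfull : (((u ++ c :: cs).length : Nat) : Int) = ((((u ++ [c]) ++ cs).length : Nat) : Int) := by
        rw [← hassoc]
      have hstart : (u.length : Int) + 1 = (((u ++ [c]).length : Nat) : Int) := by
        simp
      rw [hstart, hassoc]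
      have := ih (u ++ [c]) (par ++ [q])
        (by simp) (by simp [hlen])
        (by
          simp only [List.getLastD_concat, hq]
          rcases hp with h | h <;> rw [h] <;> split_ifs <;> norm_num)
        (fun v hvv => hv v (by simp [hvv]))
      rw [this]
      have hlast : (u ++ [c]).getLastD 0 = c := by simp
      rw [hlast]
      have hcont : pvCont tol (c :: cs) (u.getLastD 0) par = pvCont tol cs c (par ++ [q]) := by
        simp [pvCont, hq]
      rw [hcont]

lemma pvBfold (tol : Int) : ∀ (rest : List Int) (prev : Int) (par : List Int),
    (((prev :: rest).zip rest).foldl (pvStepB tol) (par, par.getLastD 0)).1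
      = pvCont tol rest prev par := by
  intro rest
  induction rest with
  | nil => intro prev par; simp [pvCont]
  | cons c cs ih =>
      intro prev par
      have hz : (prev :: c :: cs).zip (c :: cs) = (prev, c) :: (c :: cs).zip cs := by simp
      rw [hz, List.foldl_cons]
      have hstep : pvStepB tol (par, par.getLastD 0) (prev, c)
          = (par ++ [if |c - prev| > tol then 1 - par.getLastD 0 else par.getLastD 0],
             (par ++ [if |c - prev| > tol then 1 - par.getLastD 0 else par.getLastD 0]).getLastD 0) := by
        simp [pvStepB]
      rw [hstep, ih]
      simp [pvCont]

-- ===== VERDICT (by name: the statement is the Claim_ definition above) =====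
theorem classify_left_baselines_by_index_spec : Claim_equal_classify_left_baselines_by_index := by
  intro left_coords tolerance hdom hpre
  unfold Spec_classify_left_baselines_by_index
  match left_coords, hpre with
  | x0 :: rest, _ =>
    have hv : ∀ v ∈ (x0 :: rest), v ≤ 9999999999 := by
      intro v hvv
      unfold Dom_classify_left_baselines_by_index at hdom
      simp only [Bool.and_eq_true, List.all_eq_true] at hdom
      have := hdom.1 v hvv
      simp [pvDomInt] at this
      omega
    have hinit : (([0], [], 0, PySem.List.pyGetD (x0 :: rest) 0 0, 9999999999) :
        List Int × List Int × Int × Int × Int) = pvSt [x0] [0] := by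
      simp [pvSt, pvC0, pvC1, pvM0, pvM1, PySem.List.enumerate_cons, PySem.List.enumerate_nil,
        PySem.List.minD, PySem.List.min?, PySem.List.pyGetD_zero_cons]
    have hmain := pvMain tolerance rest [x0] [0] (by simp) (by simp) (by simp)
      (fun v hvv => hv v (by simp [hvv]))
    simp only [List.singleton_append, List.length_singleton, Nat.cast_one] at hmain
    have hx : ([x0] : List Int).getLastD 0 = x0 := rfl
    rw [hx] at hmain
    have hb := pvBfold tolerance rest x0 [0]
    unfold classify_left_baselines_by_index classify_left_baselines_by_index_alt
    rw [hinit]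
    rw [hmain]
    have htail : (x0 :: rest).tail = rest := rfl
    rw [htail]
    have hbb : (((x0 :: rest).zip rest).foldl (pvStepB tolerance) ([0], 0)).1
        = pvCont tolerance rest x0 [0] := by
      have h0 : (([0], 0) : List Int × Int) = (([0] : List Int), ([0] : List Int).getLastD 0) := by
        simp
      rw [h0, hb]
    rw [hbb]
    simp only [pvSt]
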